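-- pv_equiv track=rewrite | github.com/Manasag143/EWS_new | pydantic.py | categorize_flags
-- ===== SOURCE A (Python) =====
-- from typing import Dict, List, Any, Optional, Union
--
-- def categorize_flags(flags: List[str]) -> Dict[str, List[str]]:
--     """Categorize flags based on keywords"""
--     categories = {
--         'debt_related': ['debt', 'borrowing', 'leverage', 'loan'],
--         'revenue_related': ['revenue', 'sales', 'income', 'turnover'],
--         'profitability_related': ['profit', 'margin', 'ebitda', 'profitability'],
--         'liquidity_related': ['cash', 'liquidity', 'working capital'],
--         'asset_related': ['asset', 'receivable', 'inventory', 'goodwill'],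
--         'operational_related': ['operation', 'supply chain', 'production', 'efficiency']
--     }
--
--     categorized_flags = {category: [] for category in categories}
--     uncategorized = []
--
--     for flag in flags:
--         flag_lower = flag.lower()
--         categorized = False
--
--         for category, keywords in categories.items():
--             if any(keyword in flag_lower for keyword in keywords):
--                 categorized_flags[category].append(flag)
--                 categorized = True
--                 break
--
--         if not categorized:
--             uncategorized.append(flag)
--
--     if uncategorized:
--         categorized_flags['other'] = uncategorized
--
--     return categorized_flags
-- ===== SOURCE B (Python) =====
-- from typing import Dict, List
--
--
-- def categorize_flags(flags: List[str]) -> Dict[str, List[str]]: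
--     """Categorize flags based on keywords"""
--     categories = {
--         'debt_related': ['debt', 'borrowing', 'leverage', 'loan'],
--         'revenue_related': ['revenue', 'sales', 'income', 'turnover'],
--         'profitability_related': ['profit', 'margin', 'ebitda', 'profitability'],
--         'liquidity_related': ['cash', 'liquidity', 'working capital'],
--         'asset_related': ['asset', 'receivable', 'inventory', 'goodwill'],
--         'operational_related': ['operation', 'supply chain', 'production', 'efficiency']
--     }
--
--     # flat ordered (keyword, category) pairs: first match = first matching category
--     pairs = [(kw, cat) for cat, kws in categories.items() for kw in kws]
--
--     def classify(flag):
--         fl = flag.lower()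
--         for kw, cat in pairs:
--             if kw in fl:
--                 return cat
--         return None
--
--     labels = [classify(f) for f in flags]
--     result = {cat: [f for f, l in zip(flags, labels) if l == cat]
--               for cat in categories}
--     other = [f for f, l in zip(flags, labels) if l is None]
--     if other:
--         result['other'] = other
--     return result
-- ===== Notes on version B (the rewrite author's own statement) =====
-- stated objective: alternative
-- what changed: Replaces A's flag-major nested loop that mutates the result dict (inner scan over categories with any()) by a flat ordered (keyword, category) pair table, a one-shot classification of each flag, and a category-major comprehension that builds each bucket by filtering the labelled flags.
import Mathlib
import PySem

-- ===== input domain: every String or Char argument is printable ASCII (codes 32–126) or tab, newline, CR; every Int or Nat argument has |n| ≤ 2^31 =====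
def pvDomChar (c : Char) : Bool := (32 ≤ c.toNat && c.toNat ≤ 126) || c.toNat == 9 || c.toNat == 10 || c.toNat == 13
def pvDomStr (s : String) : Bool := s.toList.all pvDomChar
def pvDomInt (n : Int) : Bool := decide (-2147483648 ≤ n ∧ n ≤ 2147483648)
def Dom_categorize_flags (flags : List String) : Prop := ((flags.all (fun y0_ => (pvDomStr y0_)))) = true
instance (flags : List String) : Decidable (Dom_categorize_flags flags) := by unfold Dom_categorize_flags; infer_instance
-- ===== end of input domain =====

-- B replaces A's flag-major nested loop mutating the result dict by a flat (keyword, category)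
-- table, a one-shot classification per flag, and a category-major construction by filtering
-- the labelled flags (objective: alternative decomposition; same asymptotic cost).

-- ===== PORT A =====
def pvCategoriesA : List (String × List String) :=
  [("debt_related", ["debt", "borrowing", "leverage", "loan"]),
   ("revenue_related", ["revenue", "sales", "income", "turnover"]),
   ("profitability_related", ["profit", "margin", "ebitda", "profitability"]),
   ("liquidity_related", ["cash", "liquidity", "working capital"]),
   ("asset_related", ["asset", "receivable", "inventory", "goodwill"]),
   ("operational_related", ["operation", "supply chain", "production", "efficiency"])]

def categorize_flags (flags : List String) : List (String × List String) :=
  -- categorized_flags = {category: [] for category in categories}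
  let categorized0 : PySem.Dict String (List String) :=
    PySem.Dict.ofList (pvCategoriesA.map (fun c => (c.1, ([] : List String))))
  -- the flag loop, carrying (categorized_flags, uncategorized); the inner
  -- 'for category, keywords in categories.items(): if any(…): append; break' is find?
  let res := flags.foldl (fun st flag =>
      let flagLower := PySem.Str.lower flag
      match pvCategoriesA.find? (fun ck => ck.2.any (fun kw => PySem.Str.isIn kw flagLower)) with
      | some ck => (st.1.modify ck.1 [] (fun l => l ++ [flag]), st.2)
      | none => (st.1, st.2 ++ [flag])) (categorized0, ([] : List String))
  -- if uncategorized: categorized_flags['other'] = uncategorized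
  (if res.2.isEmpty then res.1 else res.1.insert "other" res.2).items

-- ===== PORT B =====
def pvCategoriesB : List (String × List String) :=
  [("debt_related", ["debt", "borrowing", "leverage", "loan"]),
   ("revenue_related", ["revenue", "sales", "income", "turnover"]),
   ("profitability_related", ["profit", "margin", "ebitda", "profitability"]),
   ("liquidity_related", ["cash", "liquidity", "working capital"]),
   ("asset_related", ["asset", "receivable", "inventory", "goodwill"]),
   ("operational_related", ["operation", "supply chain", "production", "efficiency"])]

-- pairs = [(kw, cat) for cat, kws in categories.items() for kw in kws]
def pvPairsB : List (String × String) :=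
  pvCategoriesB.flatMap (fun c => c.2.map (fun kw => (kw, c.1)))

-- def classify(flag): first pair whose keyword is a substring of flag.lower(), else None
def pvClassifyB (flag : String) : Option String :=
  (pvPairsB.find? (fun p => PySem.Str.isIn p.1 (PySem.Str.lower flag))).map (fun p => p.2)

def categorize_flags_alt (flags : List String) : List (String × List String) :=
  let labels := flags.map pvClassifyB
  let result := pvCategoriesB.map (fun c =>
    (c.1, ((flags.zip labels).filter (fun fl => fl.2 == some c.1)).map (fun fl => fl.1)))
  let other := ((flags.zip labels).filter (fun fl => fl.2 == none)).map (fun fl => fl.1)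
  if other.isEmpty then result else result ++ [("other", other)]

-- ===== PRECONDITION & SPEC =====
def Spec_categorize_flags (flags : List String) (out : List (String × List String)) : Prop := out = categorize_flags_alt flags
instance (flags : List String) (out : List (String × List String)) : Decidable (Spec_categorize_flags flags out) := by unfold Spec_categorize_flags; infer_instance

-- ===== CLAIM (what is proved, stated in full; the proofs are below) =====
def Claim_equal_categorize_flags : Prop := ∀ (flags : List String), Dom_categorize_flags flags → Spec_categorize_flags flags (categorize_flags flags)

-- ===== LEMMAS AND PROOFS =====

-- proof-side names: A's per-flag classification and the category-name list
def pvClassifyA (flag : String) : Option String :=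
  (pvCategoriesA.find? (fun ck => ck.2.any (fun kw => PySem.Str.isIn kw (PySem.Str.lower flag)))).map (fun ck => ck.1)

def pvCatNames : List String := pvCategoriesA.map (fun c => c.1)

-- first match in the flat pair list = first category any of whose keywords matches
lemma find?_flat_pairs (q : String → Bool) (cats : List (String × List String)) :
    ((cats.flatMap (fun c => c.2.map (fun kw => (kw, c.1)))).find? (fun p => q p.1)).map (fun p => p.2)
      = (cats.find? (fun c => c.2.any q)).map (fun c => c.1) := by
  induction cats with
  | nil => simp
  | cons c rest ih =>
    rw [List.flatMap_cons, List.find?_append, List.find?_map]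
    have hcomp : ((fun p : String × String => q p.1) ∘ fun kw => (kw, c.1)) = q := rfl
    rw [hcomp]
    cases hq : c.2.any q with
    | true =>
      obtain ⟨kw, hkwmem, hkwq⟩ := List.any_eq_true.mp hq
      obtain ⟨kw', hkw'⟩ := Option.isSome_iff_exists.mp
        (List.find?_isSome.mpr ⟨kw, hkwmem, hkwq⟩)
      rw [hkw', List.find?_cons_of_pos (by simpa using hq)]
      rfl
    | false =>
      have hnone : c.2.find? q = none := List.find?_eq_none.mpr
        (fun x hx => by simpa using List.any_eq_false.mp hq x hx)
      rw [hnone, List.find?_cons_of_neg (by simp [hq])]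
      simpa using ih

lemma classify_eq (flag : String) : pvClassifyA flag = pvClassifyB flag := by
  unfold pvClassifyA pvClassifyB pvPairsB
  exact (find?_flat_pairs (fun kw => PySem.Str.isIn kw (PySem.Str.lower flag)) pvCategoriesA).symm

-- zipping flags with their labels and filtering = filtering flags directly
lemma zip_filter_map (k : String → Option String) (p : Option String → Bool) (flags : List String) :
    ((flags.zip (flags.map k)).filter (fun fl => p fl.2)).map (fun fl => fl.1)
      = flags.filter (fun f => p (k f)) := by
  induction flags with
  | nil => simp
  | cons f fs ih =>
    simp only [List.map_cons, List.zip_cons_cons, List.filter_cons]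
    by_cases h : p (k f) <;> simp [h, ih]

lemma zip_filter_none (flags : List String) :
    ((flags.zip (flags.map pvClassifyB)).filter (fun fl => fl.2 == none)).map (fun fl => fl.1)
      = flags.filter (fun f => pvClassifyB f == none) :=
  zip_filter_map pvClassifyB (fun o => o == none) flags

lemma zip_filter_some (flags : List String) (c : String) :
    ((flags.zip (flags.map pvClassifyB)).filter (fun fl => fl.2 == some c)).map (fun fl => fl.1)
      = flags.filter (fun f => pvClassifyB f == some c) :=
  zip_filter_map pvClassifyB (fun o => o == some c) flags

-- modifying one category bucket of the all-categories dict
lemma modify_mk_map (names : List String) (hnd : names.Nodup) (g : String → List String)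
    (c : String) (hc : c ∈ names) (h : List String → List String) :
    (PySem.Dict.mk (names.map (fun n => (n, g n)))).modify c [] h
      = PySem.Dict.mk (names.map (fun n => (n, if n = c then h (g n) else g n))) := by
  have hkeys : (PySem.Dict.mk (names.map (fun n => (n, g n)))).keys = names := by
    simp only [PySem.Dict.keys, List.map_map]
    rw [show ((fun x : String × List String => x.1) ∘ fun n : String => (n, g n))
        = fun n => n from rfl]
    simp
  have hndk : (PySem.Dict.mk (names.map (fun n => (n, g n)))).keys.Nodup := by
    rw [hkeys]; exact hnd
  have hget : (PySem.Dict.mk (names.map (fun n => (n, g n)))).getD c [] = g c :=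
    PySem.Dict.getD_of_mem_items _ (List.mem_map_of_mem (f := fun n => (n, g n)) hc) hndk []
  have hcont : (PySem.Dict.mk (names.map (fun n => (n, g n)))).contains c = true := by
    rw [PySem.Dict.contains_eq_decide_mem_keys, hkeys]; simp [hc]
  apply PySem.Dict.ext
  show ((PySem.Dict.mk (names.map (fun n => (n, g n)))).insert c
      (h ((PySem.Dict.mk (names.map (fun n => (n, g n)))).getD c []))).items = _
  rw [hget, PySem.Dict.items_insert_of_contains _ _ hcont]
  show (names.map (fun n => (n, g n))).map _ = _
  rw [List.map_map]
  apply List.map_congr_left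
  intro n _
  by_cases hn : n = c <;> simp [hn]

lemma catNames_nodup : pvCatNames.Nodup := by decide

-- loop invariant for A's flag loop
lemma foldA (flags : List String) : ∀ (g : String → List String) (u : List String),
    flags.foldl (fun st flag =>
        let flagLower := PySem.Str.lower flag
        match pvCategoriesA.find? (fun ck => ck.2.any (fun kw => PySem.Str.isIn kw flagLower)) with
        | some ck => (st.1.modify ck.1 [] (fun l => l ++ [flag]), st.2)
        | none => (st.1, st.2 ++ [flag]))
      (PySem.Dict.mk (pvCatNames.map (fun n => (n, g n))), u)
      = (PySem.Dict.mk (pvCatNames.map (fun n =>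
            (n, g n ++ flags.filter (fun f => pvClassifyA f == some n)))),
         u ++ flags.filter (fun f => pvClassifyA f == none)) := by
  induction flags with
  | nil => intro g u; simp
  | cons f fs ih =>
    intro g u
    rw [List.foldl_cons]
    cases hf : pvCategoriesA.find? (fun ck => ck.2.any (fun kw => PySem.Str.isIn kw (PySem.Str.lower f))) with
    | none =>
      have hcl : pvClassifyA f = none := by unfold pvClassifyA; rw [hf]; rfl
      simp only [hf]
      rw [ih g (u ++ [f])]
      simp only [Prod.mk.injEq, PySem.Dict.mk.injEq]
      refine ⟨?_, ?_⟩
      · apply List.map_congr_left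
        intro n _
        simp [hcl]
      · simp [hcl]
    | some ck =>
      have hcl : pvClassifyA f = some ck.1 := by unfold pvClassifyA; rw [hf]; rfl
      have hmem : ck.1 ∈ pvCatNames := List.mem_map_of_mem (List.mem_of_find?_eq_some hf)
      simp only [hf]
      rw [modify_mk_map pvCatNames catNames_nodup g ck.1 hmem (fun l => l ++ [f])]
      rw [ih (fun n => if n = ck.1 then g n ++ [f] else g n) u]
      simp only [Prod.mk.injEq, PySem.Dict.mk.injEq]
      refine ⟨?_, ?_⟩
      · apply List.map_congr_left
        intro n _
        by_cases hn : n = ck.1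
        · simp [hcl, hn]
        · simp [hcl, hn, Ne.symm hn]
      · simp [hcl]

-- B's comprehension form, with the zip flattened away
lemma alt_eq (flags : List String) :
    categorize_flags_alt flags =
      (if (flags.filter (fun f => pvClassifyB f == none)).isEmpty then
        pvCategoriesB.map (fun c => (c.1, flags.filter (fun f => pvClassifyB f == some c.1)))
      else
        pvCategoriesB.map (fun c => (c.1, flags.filter (fun f => pvClassifyB f == some c.1)))
          ++ [("other", flags.filter (fun f => pvClassifyB f == none))]) := by
  unfold categorize_flags_alt
  simp only [zip_filter_none, zip_filter_some]

lemma dict0_eq :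
    PySem.Dict.ofList (pvCategoriesA.map (fun c => (c.1, ([] : List String))))
      = PySem.Dict.mk (pvCatNames.map (fun n => (n, ([] : List String)))) := by decide

lemma other_not_mem : "other" ∉ pvCatNames := by decide

lemma items_mk {κ ν : Type} [BEq κ] (l : List (κ × ν)) : (PySem.Dict.mk l).items = l := rfl

-- ===== VERDICT (by name: the statement is the Claim_ definition above) =====
theorem categorize_flags_spec : Claim_equal_categorize_flags := by
  intro flags _
  show categorize_flags flags = categorize_flags_alt flags
  unfold categorize_flags
  dsimp only
  rw [dict0_eq, foldA flags (fun _ => ([] : List String)) [], alt_eq]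
  dsimp only [List.nil_append]
  have hcl : ∀ (p : Option String → Bool),
      flags.filter (fun f => p (pvClassifyA f)) = flags.filter (fun f => p (pvClassifyB f)) := by
    intro p
    apply List.filter_congr
    intro f _
    rw [classify_eq f]
  have hmap : pvCatNames.map (fun n =>
        (n, flags.filter (fun f => pvClassifyA f == some n)))
      = pvCategoriesB.map (fun c => (c.1, flags.filter (fun f => pvClassifyB f == some c.1))) := by
    show (pvCategoriesA.map (fun c => c.1)).map _ = _
    rw [List.map_map]
    apply List.map_congr_left
    intro c _
    simp only [Function.comp]
    rw [hcl (fun o => o == some c.1)]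
  have hother := hcl (fun o => o == none)
  by_cases he : (flags.filter (fun f => pvClassifyA f == none)).isEmpty
  · rw [if_pos (by simpa using he), if_pos (by rw [← hother]; simpa using he)]
    rw [items_mk]
    exact hmap
  · rw [if_neg (by simpa using he), if_neg (by rw [← hother]; simpa using he)]
    have hcont : (PySem.Dict.mk (pvCatNames.map (fun n =>
        (n, flags.filter (fun f => pvClassifyA f == some n))))).contains "other" = false := by
      rw [PySem.Dict.contains_eq_decide_mem_keys]
      simp only [PySem.Dict.keys, List.map_map]
      rw [show ((fun x : String × List String => x.1)
          ∘ fun n : String => (n, flags.filter (fun f => pvClassifyA f == some n)))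
          = fun n => n from rfl]
      simp [other_not_mem]
    rw [PySem.Dict.items_insert_of_not_contains _ _ hcont, items_mk, hmap, hother]
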